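-- pv_equiv track=rewrite | github.com/elipugh/React | combine_files.py | removeLongRepeats
-- ===== SOURCE A (Python) =====
-- def removeLongRepeats(str):
--     curr = ""
--     currCount = 0
--     cleanedstr = ""
--     hasLongRepeats = False
--
--     for char in str:
--         if curr == char:
--             currCount += 1
--         else:
--             curr = char
--             currCount = 1
--
--         if currCount <= 3:
--             cleanedstr += char
--         else:
--             hasLongRepeats = True
--
--     return cleanedstr, hasLongRepeats
-- ===== SOURCE B (Python) =====
-- def removeLongRepeats(str):
--     parts = []
--     hasLongRepeats = False
--     i = 0
--     n = len(str)
--     while i < n: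
--         j = i
--         while j < n and str[j] == str[i]:
--             j += 1
--         run = j - i
--         parts.append(str[i] * min(run, 3))
--         if run > 3:
--             hasLongRepeats = True
--         i = j
--     return "".join(parts), hasLongRepeats
-- ===== Notes on version B (the rewrite author's own statement) =====
-- stated objective: alternative
-- what changed: Replaces the per-character accumulator loop (current char, running count, string concatenation per char) with a run-level two-pointer scan: each maximal run of equal characters is located at once, char*min(run,3) is emitted per run, and the pieces are joined at the end.
import Mathlib
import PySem

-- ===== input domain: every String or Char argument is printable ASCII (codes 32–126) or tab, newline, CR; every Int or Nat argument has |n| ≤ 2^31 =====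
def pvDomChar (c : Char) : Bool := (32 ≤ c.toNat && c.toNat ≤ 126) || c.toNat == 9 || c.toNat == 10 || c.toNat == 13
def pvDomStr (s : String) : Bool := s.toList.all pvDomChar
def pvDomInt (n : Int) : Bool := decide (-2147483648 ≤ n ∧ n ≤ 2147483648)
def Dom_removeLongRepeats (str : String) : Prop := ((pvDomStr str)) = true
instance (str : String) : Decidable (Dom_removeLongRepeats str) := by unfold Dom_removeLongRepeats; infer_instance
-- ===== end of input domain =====

-- B replaces A's per-character accumulator loop with a run-level two-pointer scan (alternative decomposition, same result).


-- ===== PORT A =====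
-- state = (curr, currCount, cleanedstr, hasLongRepeats); curr starts as "" (matches no char) → Option Char
def stepA (st : Option Char × Nat × List Char × Bool) (ch : Char) : Option Char × Nat × List Char × Bool :=
  let p : Option Char × Nat := if st.1 = some ch then (st.1, st.2.1 + 1) else (some ch, 1)
  if p.2 ≤ 3 then (p.1, p.2, st.2.2.1 ++ [ch], st.2.2.2)
  else (p.1, p.2, st.2.2.1, true)

def removeLongRepeats (str : String) : String × Bool :=
  let st := str.toList.foldl stepA (none, 0, [], false)
  (String.mk st.2.2.1, st.2.2.2)

-- ===== PORT B =====
-- Source B's outer while: one step per maximal run; the inner while (scan j while equal) is takeWhile/dropWhile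
def altGo (l : List Char) : List Char × Bool :=
  match l with
  | [] => ([], false)
  | c :: rest =>
    let run := 1 + (rest.takeWhile (· == c)).length
    let tail := rest.dropWhile (· == c)
    let r := altGo tail
    (List.replicate (min run 3) c ++ r.1, decide (3 < run) || r.2)
termination_by l.length
decreasing_by
  simp only [List.length_cons]
  exact Nat.lt_succ_of_le (List.length_dropWhile_le _ _)

def removeLongRepeats_alt (str : String) : String × Bool :=
  let r := altGo str.toList
  (String.mk r.1, r.2)

-- ===== PRECONDITION & SPEC =====
def Spec_removeLongRepeats (str : String) (out : String × Bool) : Prop := out = removeLongRepeats_alt str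
instance (str : String) (out : String × Bool) : Decidable (Spec_removeLongRepeats str out) := by unfold Spec_removeLongRepeats; infer_instance

-- ===== CLAIM (what is proved, stated in full; the proofs are below) =====
def Claim_equal_removeLongRepeats : Prop := ∀ (str : String), Dom_removeLongRepeats str → Spec_removeLongRepeats str (removeLongRepeats str)

-- ===== LEMMAS AND PROOFS =====

-- invariant of A's fold from a mid-run state (curr = c, count = k ≥ 1)
theorem foldA_mid (t : List Char) : ∀ (c : Char) (k : Nat) (acc : List Char) (flag : Bool), 1 ≤ k →
    (List.foldl stepA (some c, k, acc, flag) t).2.2 =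
      (acc ++ List.replicate (min (k + (t.takeWhile (· == c)).length) 3 - min k 3) c
           ++ (altGo (t.dropWhile (· == c))).1,
       flag || (decide (0 < (t.takeWhile (· == c)).length ∧ 3 < k + (t.takeWhile (· == c)).length)
             || (altGo (t.dropWhile (· == c))).2)) := by
  induction t with
  | nil => intro c k acc flag hk; simp [altGo]
  | cons d t ih =>
    intro c k acc flag hk
    by_cases h : c = d
    · subst h
      have hstep : stepA (some c, k, acc, flag) c =
          (if k + 1 ≤ 3 then ((some c : Option Char), k + 1, acc ++ [c], flag)
           else ((some c : Option Char), k + 1, acc, true)) := by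
        simp [stepA]
      have htw : (c :: t).takeWhile (· == c) = c :: t.takeWhile (· == c) := by
        simp [List.takeWhile]
      have hdw : (c :: t).dropWhile (· == c) = t.dropWhile (· == c) := by
        simp [List.dropWhile]
      rw [List.foldl_cons, hstep]
      by_cases h3 : k + 1 ≤ 3
      · rw [if_pos h3, ih c (k + 1) (acc ++ [c]) flag (by omega)]
        simp only [htw, hdw, List.length_cons]
        generalize (List.takeWhile (fun x => x == c) t).length = m
        simp only [Prod.mk.injEq, List.append_assoc, List.singleton_append]
        refine ⟨?_, ?_⟩
        · rw [← List.replicate_succ]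
          have : min (k + 1 + m) 3 - min (k + 1) 3 + 1 = min (k + (m + 1)) 3 - min k 3 := by
            omega
          rw [this]
        · congr 2
          simp only [decide_eq_decide]
          omega
      · rw [if_neg h3, ih c (k + 1) acc true (by omega)]
        simp only [htw, hdw, List.length_cons]
        generalize (List.takeWhile (fun x => x == c) t).length = m
        have h1 : (decide (0 < m + 1 ∧ 3 < k + (m + 1)) : Bool) = true := by
          simp; omega
        have h2 : min (k + 1 + m) 3 - min (k + 1) 3 = min (k + (m + 1)) 3 - min k 3 := by omega
        simp only [h1, h2, Bool.true_or, Bool.or_true]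
    · have hstep : stepA (some c, k, acc, flag) d = ((some d : Option Char), 1, acc ++ [d], flag) := by
        simp [stepA, h]
      have hbeq : (d == c) = false := by simp [Ne.symm h]
      have htw : (d :: t).takeWhile (· == c) = [] := by simp [List.takeWhile, hbeq]
      have hdw : (d :: t).dropWhile (· == c) = d :: t := by simp [List.dropWhile, hbeq]
      rw [List.foldl_cons, hstep, ih d 1 (acc ++ [d]) flag (le_refl 1)]
      have hgo : altGo (d :: t) =
          (List.replicate (min (1 + (t.takeWhile (· == d)).length) 3) d
             ++ (altGo (t.dropWhile (· == d))).1,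
           decide (3 < 1 + (t.takeWhile (· == d)).length) || (altGo (t.dropWhile (· == d))).2) := by
        rw [altGo]
      simp only [htw, hdw, hgo, List.length_nil, Nat.add_zero]
      generalize (List.takeWhile (fun x => x == d) t).length = m
      have h0 : min k 3 - min k 3 = 0 := by omega
      simp only [Prod.mk.injEq, h0, List.replicate_zero, List.nil_append,
        List.append_assoc, List.singleton_append]
      refine ⟨?_, ?_⟩
      · rw [← List.replicate_succ]
        have : min (1 + m) 3 - min 1 3 + 1 = min (1 + m) 3 := by omega
        rw [this]
      · have hd : (decide (0 < m ∧ 3 < 1 + m) : Bool) = decide (3 < 1 + m) := by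
          simp only [decide_eq_decide]; omega
        simp [hd]

theorem go_eq (l : List Char) :
    (l.foldl stepA (none, 0, [], false)).2.2 = altGo l := by
  cases l with
  | nil => simp [altGo]
  | cons d t =>
    have hstep : stepA (none, 0, [], false) d = ((some d : Option Char), 1, ([d] : List Char), false) := by
      simp [stepA]
    rw [List.foldl_cons, hstep, foldA_mid t d 1 [d] false (le_refl 1)]
    have hgo : altGo (d :: t) =
        (List.replicate (min (1 + (t.takeWhile (· == d)).length) 3) d
           ++ (altGo (t.dropWhile (· == d))).1,
         decide (3 < 1 + (t.takeWhile (· == d)).length) || (altGo (t.dropWhile (· == d))).2) := by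
      rw [altGo]
    simp only [hgo]
    generalize (List.takeWhile (fun x => x == d) t).length = m
    simp only [Prod.mk.injEq, List.singleton_append, Bool.false_or]
    refine ⟨?_, ?_⟩
    · rw [← List.replicate_succ]
      have : min (1 + m) 3 - min 1 3 + 1 = min (1 + m) 3 := by omega
      rw [this]
    · have hd : (decide (0 < m ∧ 3 < 1 + m) : Bool) = decide (3 < 1 + m) := by
        simp only [decide_eq_decide]; omega
      simp [hd]

-- ===== VERDICT (by name: the statement is the Claim_ definition above) =====
theorem removeLongRepeats_spec : Claim_equal_removeLongRepeats := by
  intro str _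
  simp only [Spec_removeLongRepeats, removeLongRepeats, removeLongRepeats_alt, go_eq]
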